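-- pv_equiv track=rewrite | github.com/yu2799/AtCoder | meetup/220718/240E.py | dfs
-- ===== SOURCE A (Python) =====
-- from collections import deque
--
-- def dfs(graph, n):
--     res = [None] * n
--     visited = set()
--     next_visit = deque([(0, -1)])
--     cnt = 1
--     while next_visit:
--         cur, parent = next_visit.pop()
--         if cur != 0 and len(graph[cur]) == 1:
--             res[cur] = (cnt, cnt)
--             cnt = cnt + 1
--         elif cur in visited:
--             left = 2 * 10**5
--             right = -1
--             for i in graph[cur]:
--                 if i != parent:
--                     left = min(left, res[i][0])
--                     right = max(right, res[i][1])
--             res[cur] = (left, right)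
--         else:
--             next_visit.append((cur, parent))
--             visited.add(cur)
--             for i in graph[cur]:
--                 if i != parent:
--                     next_visit.append((i, cur))
--     return res
-- ===== SOURCE B (Python) =====
-- def dfs(graph, n):
--     res = [None] * n
--     cnt = 1
--
--     def visit(cur, parent):
--         nonlocal cnt
--         adj = graph[cur]
--         if cur != 0 and len(adj) == 1:
--             res[cur] = (cnt, cnt)
--             cnt = cnt + 1
--             return
--         for i in reversed(adj):
--             if i != parent:
--                 visit(i, cur)
--         left = 2 * 10**5
--         right = -1
--         for i in adj:
--             if i != parent:
--                 left = min(left, res[i][0])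
--                 right = max(right, res[i][1])
--         res[cur] = (left, right)
--
--     visit(0, -1)
--     return res
-- ===== Notes on version B (the rewrite author's own statement) =====
-- stated objective: simpler
-- what changed: A's explicit stack machine with a visited set and pushed-back combine entries is replaced by a direct recursive DFS helper visit(cur, parent) that numbers leaves and combines child intervals on return (children taken in reversed adjacency order to keep A's LIFO numbering).
-- outside the precondition, e.g. on dfs([[0, 1], [1]], 2): A returns [(1, 1), (1, 1)], B returns [(2, 2), (2, 2)]; on dfs([[0]], 1): A returns [(200000, -1)], B returns [(200000, -1)]; on dfs([[1], [0, 1]], 2): A raises TypeError, B returns [(200000, -1), (200000, -1)]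
import Mathlib
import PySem

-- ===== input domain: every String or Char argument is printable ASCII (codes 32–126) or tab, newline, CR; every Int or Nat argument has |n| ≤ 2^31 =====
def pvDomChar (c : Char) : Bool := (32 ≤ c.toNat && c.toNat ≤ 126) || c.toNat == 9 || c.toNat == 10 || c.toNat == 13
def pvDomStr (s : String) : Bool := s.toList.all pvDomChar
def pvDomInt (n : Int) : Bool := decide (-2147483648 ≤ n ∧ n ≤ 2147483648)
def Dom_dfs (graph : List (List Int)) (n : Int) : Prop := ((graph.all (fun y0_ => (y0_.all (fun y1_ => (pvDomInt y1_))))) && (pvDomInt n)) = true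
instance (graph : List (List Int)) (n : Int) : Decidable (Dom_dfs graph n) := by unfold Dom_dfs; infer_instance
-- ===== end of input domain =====

-- B replaces A's explicit stack/visited-set loop by a direct recursive DFS (simpler decomposition, same O(n) cost).
-- Both ports use fuel only as a totality guard; inside Pre_ it is never exhausted (proved via the cost/height bounds below).

-- shared by both ports: the 'left/right over neighbours ≠ parent' accumulation loop, written identically in Source A and Source B
def combineLR (adj : List Int) (parent : Int) (res : List (Option (Int × Int))) : Int × Int :=
  adj.foldl (fun lr i =>
    if i ≠ parent then
      match PySem.List.pyGet? res i with
      | some (some ab) => (min lr.1 ab.1, max lr.2 ab.2)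
      | _ => lr           -- Python raises here (res[i] is None / IndexError); inside Pre_ every such read is a set pair
    else lr) (200000, -1)

-- ===== PORT A =====
def dfsLoop (graph : List (List Int)) : Nat → List (Int × Int) → List (Option (Int × Int)) → PySem.Set Int → Int → List (Option (Int × Int))
  | 0, _, res, _, _ => res
  | _ + 1, [], res, _, _ => res
  | fuel + 1, (cur, parent) :: rest, res, visited, cnt =>
    match PySem.List.pyGet? graph cur with
    | none => res          -- Python: IndexError on graph[cur]; excluded by Pre_
    | some adj =>
      if cur ≠ 0 ∧ adj.length = 1 then
        dfsLoop graph fuel rest (PySem.List.pySetD res cur (some (cnt, cnt))) visited (cnt + 1)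
      else if PySem.Set.contains visited cur then
        dfsLoop graph fuel rest (PySem.List.pySetD res cur (some (combineLR adj parent res))) visited cnt
      else
        dfsLoop graph fuel
          (adj.foldl (fun s i => if i ≠ parent then (i, cur) :: s else s) ((cur, parent) :: rest))
          res (PySem.Set.add visited cur) cnt

def dfs (graph : List (List Int)) (n : Int) : List (Option (Int × Int)) :=
  dfsLoop graph (2 + 2 * graph.length + 2 * (graph.map List.length).sum)
    [(0, -1)] (List.replicate n.toNat none) PySem.Set.empty 1

-- ===== PORT B =====
def visitB (graph : List (List Int)) : Nat → Int → Int → List (Option (Int × Int)) → Int → List (Option (Int × Int)) × Int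
  | 0, _, _, res, cnt => (res, cnt)      -- recursion budget; never reached inside Pre_
  | fuel + 1, cur, parent, res, cnt =>
    match PySem.List.pyGet? graph cur with
    | none => (res, cnt)  -- Python: IndexError on graph[cur]; excluded by Pre_
    | some adj =>
      if cur ≠ 0 ∧ adj.length = 1 then
        (PySem.List.pySetD res cur (some (cnt, cnt)), cnt + 1)
      else
        let s1 := adj.reverse.foldl (fun (s : List (Option (Int × Int)) × Int) i =>
          if i ≠ parent then visitB graph fuel i cur s.1 s.2 else s) (res, cnt)
        (PySem.List.pySetD s1.1 cur (some (combineLR adj parent s1.1)), s1.2)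

def dfs_alt (graph : List (List Int)) (n : Int) : List (Option (Int × Int)) :=
  (visitB graph (graph.length + 1) 0 (-1) (List.replicate n.toNat none) 1).1

-- ===== PRECONDITION & SPEC =====
-- adjacency list of v (graph[v]) for 0 ≤ v < len, else []
def adjOf (graph : List (List Int)) (v : Int) : List Int := if 0 ≤ v then graph.getD v.toNat [] else []

-- is v 'expanded' by the DFS (the root, or degree ≠ 1)?  leaves are popped once and their list never read
def expdB (graph : List (List Int)) (v : Int) : Bool :=
  decide (v = 0) || decide ((adjOf graph v).length ≠ 1)

-- the edges the DFS actually follows out of v: none from a leaf; the root skips its sentinel parent -1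
def adjE (graph : List (List Int)) (v : Int) : List Int :=
  if v = 0 then (adjOf graph 0).filter (fun i => decide (i ≠ -1))
  else if (adjOf graph v).length = 1 then [] else adjOf graph v

-- cumulative closure of {0} along followed edges: sset k ⊇ all vertices the DFS reaches within k steps
def sset (graph : List (List Int)) : Nat → List Int
  | 0 => [0]
  | k + 1 => PySem.List.dedup (sset graph k ++ (sset graph k).flatMap (adjE graph))

def comp0 (graph : List (List Int)) : List Int := sset graph graph.length

def distGo (graph : List (List Int)) (v : Int) : Nat → Nat → Nat
  | 0, i => i
  | k + 1, i => if v ∈ sset graph i then i else distGo graph v k (i + 1)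

-- BFS distance from 0 (meaningful for v ∈ comp0)
def dist0 (graph : List (List Int)) (v : Int) : Nat := distGo graph v (graph.length + 1) 0

-- possible DFS parents of v: expanded vertices one level up whose list contains v
def predsB (graph : List (List Int)) (v : Int) : Int → Bool := fun w =>
  expdB graph w && decide (dist0 graph w + 1 = dist0 graph v) && decide (v ∈ adjOf graph w)

-- Pre_ excludes inputs on which the DFS walk from vertex 0 does not behave as on a tree: every reached
-- vertex must be a valid res index, lists actually expanded must be duplicate-free, followed edges must move
-- exactly one BFS level with up-edges pointing back to the unique possible parent.  Outside this A raises
-- (TypeError reading a never-set res entry, or IndexError) on all but accidental cases (self-loops, parallel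
-- edges, negative-index wraparound), where A's returned value is an artefact of its revisit bookkeeping.
def Pre_dfs (graph : List (List Int)) (n : Int) : Prop :=
  ∀ v ∈ comp0 graph, 0 ≤ v ∧ v < (graph.length : Int) ∧ v < n ∧
    (expdB graph v = true → (adjOf graph v).Nodup) ∧
    (∀ u ∈ adjE graph v, u ∈ comp0 graph ∧
      (dist0 graph u = dist0 graph v + 1 ∨ dist0 graph v = dist0 graph u + 1) ∧
      (dist0 graph u + 1 = dist0 graph v → expdB graph u = true ∧ v ∈ adjOf graph u)) ∧
    (v ≠ 0 → ((comp0 graph).filter (predsB graph v)).length = 1)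

instance (graph : List (List Int)) (n : Int) : Decidable (Pre_dfs graph n) := by unfold Pre_dfs; infer_instance

def pvWitness_dfs : List (List Int) × Int := ([[1, 2], [0], [0]], 3)

def Spec_dfs (graph : List (List Int)) (n : Int) (out : List (Option (Int × Int))) : Prop := out = dfs_alt graph n
instance (graph : List (List Int)) (n : Int) (out : List (Option (Int × Int))) : Decidable (Spec_dfs graph n out) := by unfold Spec_dfs; infer_instance

-- ===== CLAIM (what is proved, stated in full; the proofs are below) =====
def Claim_equal_dfs : Prop := ∀ (graph : List (List Int)) (n : Int), Dom_dfs graph n → Pre_dfs graph n → Spec_dfs graph n (dfs graph n)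

-- ===== LEMMAS AND PROOFS =====

-- rooted trees / forests (explicit mutual pair; a node stores its vertex and its Python adjacency list)
mutual
inductive RT where
  | node : Int → List Int → RF → RT
inductive RF where
  | nil : RF
  | cons : RT → RF → RF
end

def rootT : RT → Int
  | .node v _ _ => v

def listF : RF → List RT
  | .nil => []
  | .cons t ts => t :: listF ts

mutual
def vertsT : RT → List Int
  | .node v _ cs => v :: vertsF cs
def vertsF : RF → List Int
  | .nil => []
  | .cons t ts => vertsT t ++ vertsF ts
end

mutual
def costT : RT → Nat
  | .node v adj cs => if v ≠ 0 ∧ adj.length = 1 then 1 else 2 + costF cs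
def costF : RF → Nat
  | .nil => 0
  | .cons t ts => costT t + costF ts
end

mutual
def heightT : RT → Nat
  | .node _ _ cs => heightF cs + 1
def heightF : RF → Nat
  | .nil => 0
  | .cons t ts => max (heightT t) (heightF ts)
end

-- t is the DFS tree of `graph` below vertex v when entered from parent p (children in A's LIFO processing order)
mutual
def MGT (graph : List (List Int)) : RT → Int → Prop
  | .node v adj cs, p =>
      PySem.List.pyGet? graph v = some adj ∧ 0 ≤ v ∧
      (v ≠ 0 ∧ adj.length = 1 → cs = RF.nil) ∧
      (¬(v ≠ 0 ∧ adj.length = 1) → MGF graph cs v ((adj.filter (fun i => decide (i ≠ p))).reverse))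
def MGF (graph : List (List Int)) : RF → Int → List Int → Prop
  | .nil, _, rs => rs = []
  | .cons t ts, v, rs =>
      match rs with
      | [] => False
      | r :: rs' => rootT t = r ∧ MGT graph t v ∧ MGF graph ts v rs'
end

-- the common denotation: process a subtree, threading (res, cnt)
mutual
def visitT : RT → Int → List (Option (Int × Int)) × Int → List (Option (Int × Int)) × Int
  | .node v adj cs, p, s =>
      if v ≠ 0 ∧ adj.length = 1 then (PySem.List.pySetD s.1 v (some (s.2, s.2)), s.2 + 1)
      else
        let s1 := visitF cs v s
        (PySem.List.pySetD s1.1 v (some (combineLR adj p s1.1)), s1.2)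
def visitF : RF → Int → List (Option (Int × Int)) × Int → List (Option (Int × Int)) × Int
  | .nil, _, s => s
  | .cons t ts, v, s => visitF ts v (visitT t v s)
end

-- model of A's pending stack: a first visit of a whole subtree, or a pushed-back combine entry
inductive Entry where
  | first : RT → Int → Entry
  | second : Int → List Int → Int → Entry

def entPair : Entry → Int × Int
  | .first t p => (rootT t, p)
  | .second v _ p => (v, p)

def entVerts : Entry → List Int
  | .first t _ => vertsT t
  | .second _ _ _ => []

def entCost : Entry → Nat
  | .first t _ => costT t
  | .second _ _ _ => 1

def okE (graph : List (List Int)) : Entry → Prop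
  | .first t p => MGT graph t p
  | .second v adj _ => PySem.List.pyGet? graph v = some adj ∧ ¬(v ≠ 0 ∧ adj.length = 1)

def runM : List Entry → List (Option (Int × Int)) → Int → List (Option (Int × Int))
  | [], res, _ => res
  | .first t p :: M, res, cnt =>
      let s := visitT t p (res, cnt)
      runM M s.1 s.2
  | .second v adj p :: M, res, cnt =>
      runM M (PySem.List.pySetD res v (some (combineLR adj p res))) cnt

-- DFS tree constructed from the graph (fuel bounds the depth; never exhausted inside Pre_)
mutual
def buildT (graph : List (List Int)) : Nat → Int → Int → RT
  | 0, v, _ => .node v (adjOf graph v) .nil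
  | f + 1, v, p =>
      if v ≠ 0 ∧ (adjOf graph v).length = 1 then .node v (adjOf graph v) .nil
      else .node v (adjOf graph v)
        (buildF graph f (((adjOf graph v).filter (fun i => decide (i ≠ p))).reverse) v)
def buildF (graph : List (List Int)) : Nat → List Int → Int → RF
  | _, [], _ => .nil
  | f, i :: is, v => .cons (buildT graph f i v) (buildF graph f is v)
end

def par0 (graph : List (List Int)) (v : Int) : Int :=
  (((comp0 graph).find? (predsB graph v))).getD (-1)

def parIter (graph : List (List Int)) : Nat → Int → Int
  | 0, v => v
  | k + 1, v => par0 graph (parIter graph k v)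
theorem vertsF_eq : ∀ cs : RF, vertsF cs = (listF cs).flatMap vertsT
  | .nil => rfl
  | .cons t ts => by simp [vertsF, listF, vertsF_eq ts]

theorem costF_eq : ∀ cs : RF, costF cs = ((listF cs).map costT).sum
  | .nil => rfl
  | .cons t ts => by simp [costF, listF, costF_eq ts]

theorem mgf_elim (graph : List (List Int)) :
    ∀ (cs : RF) (v : Int) (rs : List Int), MGF graph cs v rs →
      (listF cs).map rootT = rs ∧ ∀ t ∈ listF cs, MGT graph t v
  | .nil, v, rs, h => by
      simp [MGF] at h; simp [listF, h]
  | .cons t ts, v, rs, h => by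
      match rs with
      | [] => simp [MGF] at h
      | r :: rs' =>
        obtain ⟨h1, h2, h3⟩ := h
        obtain ⟨ih1, ih2⟩ := mgf_elim graph ts v rs' h3
        refine ⟨by simp [listF, h1, ih1], ?_⟩
        intro t' ht'
        rcases (by simpa [listF] using ht' : t' = t ∨ t' ∈ listF ts) with rfl | h
        · exact h2
        · exact ih2 _ h

theorem foldl_push (adj : List Int) (parent cur : Int) (init : List (Int × Int)) :
    adj.foldl (fun s i => if i ≠ parent then (i, cur) :: s else s) init
      = ((adj.filter (fun i => decide (i ≠ parent))).reverse.map (fun i => (i, cur))) ++ init := by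
  induction adj generalizing init with
  | nil => rfl
  | cons a l ih =>
      simp only [ne_eq, ite_not, decide_not] at ih ⊢
      by_cases h : a = parent <;> simp [h, ih]

theorem foldl_if_filter {σ : Type} (adj : List Int) (parent : Int) (g : σ → Int → σ) (s0 : σ) :
    adj.foldl (fun s i => if i ≠ parent then g s i else s) s0
      = (adj.filter (fun i => decide (i ≠ parent))).foldl g s0 := by
  induction adj generalizing s0 with
  | nil => rfl
  | cons a l ih =>
      simp only [ne_eq, ite_not, decide_not] at ih ⊢
      by_cases h : a = parent <;> simp [h, ih]

theorem runM_firsts :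
    ∀ (cs : RF) (v : Int) (M : List Entry) (res : List (Option (Int × Int))) (cnt : Int),
      runM ((listF cs).map (fun t => Entry.first t v) ++ M) res cnt
        = runM M (visitF cs v (res, cnt)).1 (visitF cs v (res, cnt)).2
  | .nil, v, M, res, cnt => rfl
  | .cons t ts, v, M, res, cnt => by
      simp only [listF, List.map_cons, List.cons_append, runM, visitF]
      exact runM_firsts ts v M _ _
theorem one_le_costT (t : RT) : 1 ≤ costT t := by
  match t with
  | .node v adj cs => simp only [costT]; split <;> omega

theorem one_le_entCost (e : Entry) : 1 ≤ entCost e := by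
  cases e with
  | first t p => exact one_le_costT t
  | second => exact le_refl 1

theorem contains_eq_false {s : PySem.Set Int} {x : Int} (h : x ∉ s) : PySem.Set.contains s x = false := by
  rw [← Bool.not_eq_true, PySem.Set.contains_iff]; exact h

theorem mem_flat_first {t : RT} {p : Int} {M' : List Entry} {x : Int} (h : x ∈ vertsT t) :
    x ∈ ((Entry.first t p :: M').flatMap entVerts) := by
  rw [List.flatMap_cons]; exact List.mem_append_left _ h

theorem mem_flat_tail {e : Entry} {M' : List Entry} {x : Int} (h : x ∈ M'.flatMap entVerts) :
    x ∈ ((e :: M').flatMap entVerts) := by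
  rw [List.flatMap_cons]; exact List.mem_append_right _ h

theorem dfsLoop_runM (graph : List (List Int)) :
    ∀ (fuel : Nat) (M : List Entry) (res : List (Option (Int × Int))) (visited : PySem.Set Int) (cnt : Int),
      (M.flatMap entVerts).Nodup →
      (∀ e ∈ M, okE graph e) →
      (∀ x ∈ M.flatMap entVerts, x ∉ visited) →
      (∀ v adj p, Entry.second v adj p ∈ M → v ∈ visited) →
      (M.map entCost).sum ≤ fuel →
      dfsLoop graph fuel (M.map entPair) res visited cnt = runM M res cnt := by
  intro fuel
  induction fuel with
  | zero =>
      intro M res visited cnt _ _ _ _ hcost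
      match M with
      | [] => rfl
      | e :: M' =>
          exfalso
          have h1 := one_le_entCost e
          simp only [List.map_cons, List.sum_cons, Nat.le_zero] at hcost
          omega
  | succ f ih =>
      intro M res visited cnt hnd hok hdisj hsec hcost
      match M with
      | [] => rfl
      | .second v adj p :: M' =>
          obtain ⟨hg, hnl⟩ := hok _ List.mem_cons_self
          have hv : v ∈ visited := hsec v adj p List.mem_cons_self
          have hcv : PySem.Set.contains visited v = true := by
            rw [PySem.Set.contains_iff]; exact hv
          simp only [List.map_cons, entPair, dfsLoop, hg, if_neg hnl, hcv, if_pos trivial, runM]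
          refine ih M' _ visited cnt ?_ ?_ ?_ ?_ ?_
          · simpa [entVerts] using hnd
          · exact fun e he => hok e (List.mem_cons_of_mem _ he)
          · intro x hx; exact hdisj x (by simpa [entVerts] using hx)
          · exact fun w a q hw => hsec w a q (List.mem_cons_of_mem _ hw)
          · simp only [List.map_cons, List.sum_cons, entCost] at hcost ⊢; omega
      | .first (.node v adj cs) p :: M' =>
          obtain ⟨hg, hv0, hnl, hmgfF⟩ := hok _ List.mem_cons_self
          have hndt : ((v :: vertsF cs) ++ M'.flatMap entVerts).Nodup := by
            simpa [entVerts, vertsT] using hnd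
          have hvnotin : v ∉ vertsF cs ++ M'.flatMap entVerts := by
            have := hndt; rw [List.cons_append] at this
            exact (List.nodup_cons.mp this).1
          have hndrest : (vertsF cs ++ M'.flatMap entVerts).Nodup := by
            rw [List.cons_append] at hndt
            exact (List.nodup_cons.mp hndt).2
          by_cases hleaf : v ≠ 0 ∧ adj.length = 1
          · -- leaf entry: one pop, write, continue
            simp only [List.map_cons, entPair, rootT, dfsLoop, hg, if_pos hleaf, runM, visitT]
            refine ih M' _ visited (cnt + 1) ?_ ?_ ?_ ?_ ?_
            · exact (List.nodup_append.mp hndrest).2.1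
            · exact fun e he => hok e (List.mem_cons_of_mem _ he)
            · intro x hx; exact hdisj x (mem_flat_tail hx)
            · exact fun w a q hw => hsec w a q (List.mem_cons_of_mem _ hw)
            · simp only [List.map_cons, List.sum_cons, entCost, costT, if_pos hleaf] at hcost ⊢
              omega
          · -- unvisited non-leaf entry: push back + children, then continue on the expanded model
            have hvv : v ∉ visited :=
              hdisj v (mem_flat_first (t := RT.node v adj cs) List.mem_cons_self)
            have hcv : PySem.Set.contains visited v = false := contains_eq_false hvv
            obtain ⟨hroots, hch⟩ := mgf_elim graph cs v _ (hmgfF hleaf)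
            simp only [List.map_cons, entPair, rootT, dfsLoop, hg, if_neg hleaf, hcv,
              Bool.false_eq_true, if_false]
            rw [foldl_push]
            set M'' : List Entry :=
              (listF cs).map (fun t => Entry.first t v) ++ Entry.second v adj p :: M' with hM''
            have hstack :
                (((adj.filter (fun i => decide (i ≠ p))).reverse.map (fun i => (i, v))) ++
                  (v, p) :: M'.map entPair) = M''.map entPair := by
              rw [hM'', List.map_append, List.map_map, List.map_cons]
              congr 1
              · rw [← hroots, List.map_map]; rfl
            have hverts'' : M''.flatMap entVerts = vertsF cs ++ M'.flatMap entVerts := by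
              rw [hM'', List.flatMap_append, List.flatMap_cons]
              congr 1
              · rw [vertsF_eq, List.flatMap_map]; rfl
            rw [hstack]
            have step := ih M'' res (PySem.Set.add visited v) cnt ?_ ?_ ?_ ?_ ?_
            · rw [step, hM'', runM_firsts]
              simp only [runM, visitT, if_neg hleaf]
            · rw [hverts'']; exact hndrest
            · intro e he
              rw [hM''] at he
              rcases List.mem_append.mp he with h | h
              · obtain ⟨t', ht', rfl⟩ := List.mem_map.mp h
                exact hch t' ht'
              · rcases List.mem_cons.mp h with rfl | h
                · exact ⟨hg, hleaf⟩
                · exact hok _ (List.mem_cons_of_mem _ h)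
            · intro x hx
              rw [hverts''] at hx
              rw [PySem.Set.mem_add]
              rintro (h | rfl)
              · refine hdisj x ?_ h
                rcases List.mem_append.mp hx with h' | h'
                · exact mem_flat_first (t := RT.node v adj cs) (List.mem_cons_of_mem _ h')
                · exact mem_flat_tail h'
              · exact hvnotin hx
            · intro w a q hw
              rw [hM''] at hw
              rw [PySem.Set.mem_add]
              rcases List.mem_append.mp hw with h | h
              · obtain ⟨t', _, ht'⟩ := List.mem_map.mp h; cases ht'
              · rcases List.mem_cons.mp h with he | h
                · cases he; right; rfl
                · exact Or.inl (hsec w a q (List.mem_cons_of_mem _ h))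
            · have hc'' : (M''.map entCost).sum = costF cs + 1 + (M'.map entCost).sum := by
                rw [hM'', List.map_append, List.sum_append, List.map_map, List.map_cons, List.sum_cons]
                have : ((listF cs).map (entCost ∘ fun t => Entry.first t v)).sum = costF cs := by
                  rw [costF_eq]; rfl
                simp only [entCost] at this ⊢
                omega
              simp only [List.map_cons, List.sum_cons, entCost, costT, if_neg hleaf] at hcost
              omega
mutual
theorem visitB_eq_visitT (graph : List (List Int)) :
    ∀ (t : RT) (fuel : Nat) (p : Int) (res : List (Option (Int × Int))) (cnt : Int),
      MGT graph t p → heightT t ≤ fuel →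
      visitB graph fuel (rootT t) p res cnt = visitT t p (res, cnt)
  | .node v adj cs, fuel, p, res, cnt => by
      intro hm hh
      obtain ⟨hg, hv0, hnl, hmgfF⟩ := hm
      match fuel with
      | 0 => exact absurd hh (by simp only [heightT]; omega)
      | f + 1 =>
        have hhf : heightF cs ≤ f := by
          have : heightF cs + 1 ≤ f + 1 := hh
          omega
        simp only [visitB, rootT, hg]
        by_cases hleaf : v ≠ 0 ∧ adj.length = 1
        · simp only [if_pos hleaf, visitT]
        · simp only [if_neg hleaf, visitT]
          rw [foldl_if_filter, List.filter_reverse,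
            visitBF_eq_visitF graph cs f v _ (res, cnt) (hmgfF hleaf) hhf]

theorem visitBF_eq_visitF (graph : List (List Int)) :
    ∀ (cs : RF) (fuel : Nat) (v : Int) (rs : List Int) (s : List (Option (Int × Int)) × Int),
      MGF graph cs v rs → heightF cs ≤ fuel →
      rs.foldl (fun s i => visitB graph fuel i v s.1 s.2) s = visitF cs v s
  | .nil, fuel, v, rs, s => by
      intro hm _
      simp [MGF] at hm
      simp [hm, visitF]
  | .cons t ts, fuel, v, rs, s => by
      intro hm hh
      match rs with
      | [] => exact absurd hm (by simp [MGF])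
      | r :: rs' =>
        obtain ⟨hr, hmt, hmts⟩ := hm
        have h1 : heightT t ≤ fuel := le_trans (Nat.le_max_left _ _) hh
        have h2 : heightF ts ≤ fuel := le_trans (Nat.le_max_right _ _) hh
        rw [List.foldl_cons, ← hr, visitB_eq_visitT graph t fuel v s.1 s.2 hmt h1,
          visitBF_eq_visitF graph ts fuel v rs' _ hmts h2]
        rfl
end
mutual
theorem vertsT_bounds (graph : List (List Int)) :
    ∀ (t : RT) (p : Int), MGT graph t p → ∀ x ∈ vertsT t, 0 ≤ x ∧ x < (graph.length : Int)
  | .node v adj cs, p => by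
      intro hm x hx
      obtain ⟨hg, hv0, hnl, hmgfF⟩ := hm
      rcases List.mem_cons.mp hx with rfl | hx
      · rw [PySem.List.pyGet?_of_nonneg _ hv0] at hg
        have := (List.getElem?_eq_some_iff.mp hg).1
        omega
      · by_cases hleaf : v ≠ 0 ∧ adj.length = 1
        · rw [hnl hleaf] at hx; simp [vertsF] at hx
        · exact vertsF_bounds graph cs v _ (hmgfF hleaf) x hx
theorem vertsF_bounds (graph : List (List Int)) :
    ∀ (cs : RF) (v : Int) (rs : List Int), MGF graph cs v rs →
      ∀ x ∈ vertsF cs, 0 ≤ x ∧ x < (graph.length : Int)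
  | .nil, v, rs => by intro _ x hx; simp [vertsF] at hx
  | .cons t ts, v, rs => by
      intro hm x hx
      match rs with
      | [] => exact absurd hm (by simp [MGF])
      | r :: rs' =>
        obtain ⟨hr, hmt, hmts⟩ := hm
        rcases List.mem_append.mp hx with h | h
        · exact vertsT_bounds graph t v hmt x h
        · exact vertsF_bounds graph ts v rs' hmts x h
end

mutual
theorem costT_le (t : RT) : costT t ≤ 2 * (vertsT t).length := by
  match t with
  | .node v adj cs =>
      have := costF_le cs
      simp only [costT, vertsT, List.length_cons]
      split <;> omega
theorem costF_le (cs : RF) : costF cs ≤ 2 * (vertsF cs).length := by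
  match cs with
  | .nil => simp [costF]
  | .cons t ts =>
      have h1 := costT_le t
      have h2 := costF_le ts
      simp only [costF, vertsF, List.length_append]
      omega
end

mutual
theorem heightT_le (t : RT) : heightT t ≤ (vertsT t).length := by
  match t with
  | .node v adj cs =>
      have := heightF_le cs
      simp only [heightT, vertsT, List.length_cons]
      omega
theorem heightF_le (cs : RF) : heightF cs ≤ (vertsF cs).length := by
  match cs with
  | .nil => simp [heightF, vertsF]
  | .cons t ts =>
      have h1 := heightT_le t
      have h2 := heightF_le ts
      simp only [heightF, vertsF, List.length_append]
      omega
end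

theorem nodup_bounded_length (l : List Int) (len : Nat) (hnd : l.Nodup)
    (hb : ∀ x ∈ l, 0 ≤ x ∧ x < (len : Int)) : l.length ≤ len := by
  have hmapnd : (l.map Int.toNat).Nodup := by
    refine List.Nodup.map_on ?_ hnd
    intro x hx y hy hxy
    have h1 := hb x hx; have h2 := hb y hy
    omega
  have hsub : (l.map Int.toNat).toFinset ⊆ Finset.range len := by
    intro y hy
    rw [List.mem_toFinset] at hy
    obtain ⟨x, hx, rfl⟩ := List.mem_map.mp hy
    have := hb x hx
    rw [Finset.mem_range]
    omega
  have := Finset.card_le_card hsub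
  rw [List.toFinset_card_of_nodup hmapnd, Finset.card_range] at this
  simpa using this
theorem sset_succ_mem (graph : List (List Int)) (k : Nat) (x : Int) :
    x ∈ sset graph (k + 1) ↔ x ∈ sset graph k ∨ ∃ u ∈ sset graph k, x ∈ adjE graph u := by
  simp [sset, List.mem_append, List.mem_flatMap]

theorem sset_mono (graph : List (List Int)) {k m : Nat} (h : k ≤ m) :
    ∀ x, x ∈ sset graph k → x ∈ sset graph m := by
  induction m with
  | zero => intro x hx; rwa [Nat.le_zero.mp h] at hx
  | succ m ih =>
      intro x hx
      by_cases hk : k = m + 1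
      · rwa [hk] at hx
      · exact (sset_succ_mem graph m x).mpr (Or.inl (ih (by omega) x hx))

theorem distGo_spec (graph : List (List Int)) (v : Int) :
    ∀ (k i : Nat), (∃ m, i ≤ m ∧ m < i + k ∧ v ∈ sset graph m) → (∀ j, j < i → v ∉ sset graph j) →
      v ∈ sset graph (distGo graph v k i) ∧ ∀ j, j < distGo graph v k i → v ∉ sset graph j := by
  intro k
  induction k with
  | zero => intro i ⟨m, h1, h2, _⟩ _; omega
  | succ k ih =>
      intro i ⟨m, h1, h2, h3⟩ hlow
      by_cases hmem : v ∈ sset graph i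
      · simp only [distGo, if_pos hmem]
        exact ⟨hmem, hlow⟩
      · simp only [distGo, if_neg hmem]
        refine ih (i + 1) ⟨m, ?_, by omega, h3⟩ ?_
        · rcases Nat.eq_or_lt_of_le h1 with rfl | h
          · exact absurd h3 hmem
          · omega
        · intro j hj
          rcases Nat.lt_succ_iff_lt_or_eq.mp hj with h | rfl
          · exact hlow j h
          · exact hmem

theorem dist0_spec (graph : List (List Int)) {v : Int} (hv : v ∈ comp0 graph) :
    v ∈ sset graph (dist0 graph v) ∧ ∀ j, j < dist0 graph v → v ∉ sset graph j :=
  distGo_spec graph v (graph.length + 1) 0 ⟨graph.length, by omega, by omega, hv⟩ (by omega)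

theorem dist0_le (graph : List (List Int)) {v : Int} (hv : v ∈ comp0 graph) :
    dist0 graph v ≤ graph.length := by
  by_contra h
  exact (dist0_spec graph hv).2 graph.length (by omega) hv

theorem mem_sset_zero (graph : List (List Int)) (x : Int) : x ∈ sset graph 0 ↔ x = 0 := by
  simp [sset]

theorem mem_comp0_zero (graph : List (List Int)) : (0 : Int) ∈ comp0 graph :=
  sset_mono graph (Nat.zero_le _) 0 ((mem_sset_zero graph 0).mpr rfl)

theorem dist0_zero (graph : List (List Int)) : dist0 graph 0 = 0 := by
  have h0 : (0 : Int) ∈ sset graph 0 := (mem_sset_zero graph 0).mpr rfl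
  simp [dist0, distGo, if_pos h0]

theorem find?_eq_head?_filter {α : Type} (p : α → Bool) (l : List α) :
    l.find? p = (l.filter p).head? := by
  induction l with
  | nil => rfl
  | cons a l ih =>
      rw [List.find?_cons, List.filter_cons]
      cases h : p a
      · rw [if_neg (by simp), ih]
      · rw [if_pos rfl, List.head?_cons]

-- the unique possible DFS parent of v is par0 v
theorem par0_unique (graph : List (List Int)) (n : Int) (hp : Pre_dfs graph n) {v w : Int}
    (hv : v ∈ comp0 graph) (hv0 : v ≠ 0) (hw : w ∈ comp0 graph)
    (hwE : expdB graph w = true) (hwd : dist0 graph w + 1 = dist0 graph v)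
    (hwadj : v ∈ adjOf graph w) : par0 graph v = w := by
  obtain ⟨-, -, -, -, -, hcnt⟩ := hp v hv
  obtain ⟨a, ha⟩ := List.length_eq_one_iff.mp (hcnt hv0)
  have hwmem : w ∈ (comp0 graph).filter (predsB graph v) :=
    List.mem_filter.mpr ⟨hw, by simp [predsB, hwE, hwd, hwadj]⟩
  rw [ha, List.mem_singleton] at hwmem
  rw [par0, find?_eq_head?_filter, ha, hwmem]
  rfl

def GoodV (graph : List (List Int)) (v p : Int) : Prop :=
  v ∈ comp0 graph ∧ ((v = 0 ∧ p = -1) ∨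
    (p ∈ comp0 graph ∧ expdB graph p = true ∧ v ∈ adjOf graph p ∧
      dist0 graph p + 1 = dist0 graph v))

theorem adjOf_pyGet (graph : List (List Int)) (n : Int) (hp : Pre_dfs graph n) {v : Int}
    (hv : v ∈ comp0 graph) : PySem.List.pyGet? graph v = some (adjOf graph v) := by
  obtain ⟨hv0, hvl, -⟩ := hp v hv
  have hlt : v.toNat < graph.length := by omega
  rw [PySem.List.pyGet?_of_nonneg _ hv0, List.getElem?_eq_getElem hlt, adjOf, if_pos hv0,
    List.getD_eq_getElem?_getD, List.getElem?_eq_getElem hlt]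
  rfl

-- a root reached with dist 0 must be the start vertex with its sentinel parent
theorem goodV_zero (graph : List (List Int)) {v p : Int} (hg : GoodV graph v p) (hv0 : v = 0) :
    p = -1 := by
  rcases hg.2 with ⟨-, h⟩ | ⟨-, -, -, hd⟩
  · exact h
  · rw [hv0, dist0_zero] at hd; omega

theorem childGood (graph : List (List Int)) (n : Int) (hp : Pre_dfs graph n) {v p i : Int}
    (hg : GoodV graph v p) (hEv : ¬(v ≠ 0 ∧ (adjOf graph v).length = 1))
    (hi : i ∈ adjOf graph v) (hip : i ≠ p) :
    GoodV graph i v ∧ dist0 graph i = dist0 graph v + 1 ∧ par0 graph i = v := by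
  obtain ⟨hv, hvp⟩ := hg
  have hvE : expdB graph v = true := by
    simp only [expdB, Bool.or_eq_true, decide_eq_true_eq]
    by_cases h0 : v = 0
    · exact Or.inl h0
    · exact Or.inr (fun hl => hEv ⟨h0, hl⟩)
  have hiE : i ∈ adjE graph v := by
    by_cases h0 : v = 0
    · have hp1 : p = -1 := goodV_zero graph ⟨hv, hvp⟩ h0
      rw [h0] at hi ⊢
      rw [adjE, if_pos rfl]
      exact List.mem_filter.mpr ⟨hi, by simp [hp1 ▸ hip]⟩
    · have hl : (adjOf graph v).length ≠ 1 := fun hl => hEv ⟨h0, hl⟩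
      rw [adjE, if_neg h0, if_neg hl]
      exact hi
  obtain ⟨-, -, -, -, hadj, -⟩ := hp v hv
  obtain ⟨hic, hlev, hup⟩ := hadj i hiE
  have hdown : dist0 graph i = dist0 graph v + 1 := by
    rcases hlev with h | h
    · exact h
    · -- i would be a possible parent of v distinct from p: impossible
      exfalso
      have hvne : v ≠ 0 := by
        intro h0; rw [h0, dist0_zero] at h; omega
      obtain ⟨hiEx, hiback⟩ := hup (by omega)
      have h1 : par0 graph v = i := par0_unique graph n hp hv hvne hic hiEx (by omega) hiback
      rcases hvp with ⟨h0, -⟩ | ⟨hpc, hpE, hpadj, hpd⟩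
      · exact hvne h0
      · have h2 : par0 graph v = p := par0_unique graph n hp hv hvne hpc hpE hpd hpadj
        exact hip (h1 ▸ h2)
  have hine : i ≠ 0 := by
    intro h0; rw [h0, dist0_zero] at hdown; omega
  refine ⟨⟨hic, Or.inr ⟨hv, hvE, hi, by omega⟩⟩, hdown, ?_⟩
  exact par0_unique graph n hp hic hine hv hvE (by omega) hi

theorem root_build (graph : List (List Int)) (fuel : Nat) (v p : Int) :
    rootT (buildT graph fuel v p) = v := by
  cases fuel with
  | zero => simp [buildT, rootT]
  | succ f =>
      simp only [buildT]
      split <;> simp [rootT]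

theorem mem_buildList {graph : List (List Int)} {v p i : Int}
    (h : i ∈ ((adjOf graph v).filter (fun i => decide (i ≠ p))).reverse) :
    i ∈ adjOf graph v ∧ i ≠ p := by
  rw [List.mem_reverse] at h
  have := List.mem_filter.mp h
  simpa using this

theorem mg_build (graph : List (List Int)) (n : Int) (hp : Pre_dfs graph n) :
    ∀ (fuel : Nat) (v p : Int), GoodV graph v p → graph.length + 1 ≤ fuel + dist0 graph v →
      MGT graph (buildT graph fuel v p) p := by
  intro fuel
  induction fuel using Nat.strong_induction_on with
  | _ fuel ih =>
    intro v p hg hf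
    have hdle := dist0_le graph hg.1
    match fuel with
    | 0 => omega
    | f + 1 =>
      simp only [buildT]
      by_cases hleaf : v ≠ 0 ∧ (adjOf graph v).length = 1
      · rw [if_pos hleaf]
        exact ⟨adjOf_pyGet graph n hp hg.1, (hp v hg.1).1, fun _ => rfl,
          fun h => absurd hleaf h⟩
      · rw [if_neg hleaf]
        refine ⟨adjOf_pyGet graph n hp hg.1, (hp v hg.1).1, fun h => absurd h hleaf, fun _ => ?_⟩
        have inner : ∀ is : List Int, (∀ i ∈ is, i ∈ adjOf graph v ∧ i ≠ p) →
            MGF graph (buildF graph f is v) v is := by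
          intro is
          induction is with
          | nil => intro _; simp [buildF, MGF]
          | cons a as iha =>
              intro h
              obtain ⟨ha, hap⟩ := h a List.mem_cons_self
              obtain ⟨hga, hda, -⟩ := childGood graph n hp hg hleaf ha hap
              simp only [buildF, MGF]
              refine ⟨root_build graph f a v, ?_, iha (fun i hi => h i (List.mem_cons_of_mem _ hi))⟩
              exact ih f (by omega) a v hga (by omega)
        exact inner _ (fun i hi => mem_buildList hi)

theorem verts_build (graph : List (List Int)) (n : Int) (hp : Pre_dfs graph n) :
    ∀ (fuel : Nat) (v p : Int), GoodV graph v p → graph.length + 1 ≤ fuel + dist0 graph v →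
      ∀ u ∈ vertsT (buildT graph fuel v p), u ∈ comp0 graph ∧
        dist0 graph v ≤ dist0 graph u ∧
        parIter graph (dist0 graph u - dist0 graph v) u = v := by
  intro fuel
  induction fuel using Nat.strong_induction_on with
  | _ fuel ih =>
    intro v p hg hf u hu
    have hdle := dist0_le graph hg.1
    match fuel with
    | 0 => omega
    | f + 1 =>
      by_cases hleaf : v ≠ 0 ∧ (adjOf graph v).length = 1
      · simp only [buildT, if_pos hleaf, vertsT, vertsF] at hu
        rcases List.mem_cons.mp hu with rfl | hu'
        · exact ⟨hg.1, le_refl _, by simp [parIter]⟩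
        · simp at hu'
      · have inner : ∀ is : List Int, (∀ i ∈ is, i ∈ adjOf graph v ∧ i ≠ p) →
            ∀ u ∈ vertsF (buildF graph f is v), u ∈ comp0 graph ∧
              dist0 graph v + 1 ≤ dist0 graph u ∧
              parIter graph (dist0 graph u - dist0 graph v) u = v := by
          intro is
          induction is with
          | nil => intro _ u hu; simp [buildF, vertsF] at hu
          | cons a as iha =>
              intro h u hu
              obtain ⟨ha, hap⟩ := h a List.mem_cons_self
              obtain ⟨hga, hda, hpa⟩ := childGood graph n hp hg hleaf ha hap
              simp only [buildF, vertsF] at hu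
              rcases List.mem_append.mp hu with h' | h'
              · obtain ⟨huc, hud, hupar⟩ := ih f (by omega) a v hga (by omega) u h'
                refine ⟨huc, by omega, ?_⟩
                have hk : dist0 graph u - dist0 graph v = (dist0 graph u - dist0 graph a) + 1 := by
                  omega
                rw [hk, parIter, hupar, hpa]
              · exact iha (fun i hi => h i (List.mem_cons_of_mem _ hi)) u h'
        simp only [buildT, if_neg hleaf, vertsT] at hu
        rcases List.mem_cons.mp hu with rfl | hu'
        · exact ⟨hg.1, le_refl _, by simp [parIter]⟩
        · obtain ⟨huc, hud, hupar⟩ := inner _ (fun i hi => mem_buildList hi) u hu'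
          exact ⟨huc, by omega, hupar⟩

theorem nodup_build (graph : List (List Int)) (n : Int) (hp : Pre_dfs graph n) :
    ∀ (fuel : Nat) (v p : Int), GoodV graph v p → graph.length + 1 ≤ fuel + dist0 graph v →
      (vertsT (buildT graph fuel v p)).Nodup := by
  intro fuel
  induction fuel using Nat.strong_induction_on with
  | _ fuel ih =>
    intro v p hg hf
    have hdle := dist0_le graph hg.1
    match fuel with
    | 0 => omega
    | f + 1 =>
      by_cases hleaf : v ≠ 0 ∧ (adjOf graph v).length = 1
      · simp [buildT, if_pos hleaf, vertsT, vertsF]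
      · have inner : ∀ is : List Int, is.Nodup → (∀ i ∈ is, i ∈ adjOf graph v ∧ i ≠ p) →
            (vertsF (buildF graph f is v)).Nodup ∧
            ∀ u ∈ vertsF (buildF graph f is v),
              parIter graph (dist0 graph u - (dist0 graph v + 1)) u ∈ is ∧
              dist0 graph v + 1 ≤ dist0 graph u := by
          intro is
          induction is with
          | nil => intro _ _; simp [buildF, vertsF]
          | cons a as iha =>
              intro hnd h
              obtain ⟨ha, hap⟩ := h a List.mem_cons_self
              obtain ⟨hga, hda, -⟩ := childGood graph n hp hg hleaf ha hap
              obtain ⟨hndas, hchas⟩ :=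
                iha (List.nodup_cons.mp hnd).2 (fun i hi => h i (List.mem_cons_of_mem _ hi))
              have hhead : ∀ u ∈ vertsT (buildT graph f a v),
                  parIter graph (dist0 graph u - (dist0 graph v + 1)) u = a ∧
                  dist0 graph v + 1 ≤ dist0 graph u := by
                intro u hu
                obtain ⟨-, hud, hupar⟩ := verts_build graph n hp f a v hga (by omega) u hu
                rw [hda] at hud hupar
                exact ⟨hupar, hud⟩
              simp only [buildF, vertsF]
              constructor
              · rw [List.nodup_append]
                refine ⟨ih f (by omega) a v hga (by omega), hndas, ?_⟩
                intro u hu w hw heq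
                subst heq
                have h1 := (hhead u hu).1
                have h2 := (hchas u hw).1
                rw [h1] at h2
                exact (List.nodup_cons.mp hnd).1 h2
              · intro u hu
                rcases List.mem_append.mp hu with hu | hu
                · exact ⟨(hhead u hu).1 ▸ List.mem_cons_self, (hhead u hu).2⟩
                · exact ⟨List.mem_cons_of_mem _ (hchas u hu).1, (hchas u hu).2⟩
        have hrs : (((adjOf graph v).filter (fun i => decide (i ≠ p))).reverse).Nodup := by
          have hvE : expdB graph v = true := by
            simp only [expdB, Bool.or_eq_true, decide_eq_true_eq]
            by_cases h0 : v = 0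
            · exact Or.inl h0
            · exact Or.inr (fun hl => hleaf ⟨h0, hl⟩)
          have := (hp v hg.1).2.2.2.1 hvE
          exact List.nodup_reverse.mpr (this.filter _)
        obtain ⟨hndF, hchF⟩ := inner _ hrs (fun i hi => mem_buildList hi)
        simp only [buildT, if_neg hleaf, vertsT]
        rw [List.nodup_cons]
        refine ⟨?_, hndF⟩
        intro hvmem
        have := (hchF v hvmem).2
        omega

-- ===== VERDICT (by name: the statement is the Claim_ definition above) =====
theorem dfs_spec : Claim_equal_dfs := by
  unfold Claim_equal_dfs
  intro graph n _ hp
  unfold Spec_dfs dfs dfs_alt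
  have hgood : GoodV graph 0 (-1) := ⟨mem_comp0_zero graph, Or.inl ⟨rfl, rfl⟩⟩
  have hfuel : graph.length + 1 ≤ (graph.length + 1) + dist0 graph 0 := by omega
  have hmg : MGT graph (buildT graph (graph.length + 1) 0 (-1)) (-1) :=
    mg_build graph n hp _ 0 (-1) hgood hfuel
  have hnd : (vertsT (buildT graph (graph.length + 1) 0 (-1))).Nodup :=
    nodup_build graph n hp _ 0 (-1) hgood hfuel
  have hlen : (vertsT (buildT graph (graph.length + 1) 0 (-1))).length ≤ graph.length :=
    nodup_bounded_length _ _ hnd (vertsT_bounds graph _ _ hmg)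
  have hroot : rootT (buildT graph (graph.length + 1) 0 (-1)) = 0 := root_build graph _ 0 (-1)
  -- A's loop runs the one-entry model
  have hA := dfsLoop_runM graph (2 + 2 * graph.length + 2 * (graph.map List.length).sum)
      [Entry.first (buildT graph (graph.length + 1) 0 (-1)) (-1)]
      (List.replicate n.toNat none) PySem.Set.empty 1
      (by simpa [entVerts] using hnd)
      (by intro e he; rcases List.mem_cons.mp he with rfl | h
          · exact hmg
          · simp at h)
      (by intro x _; exact List.not_mem_nil)
      (by intro v adj p hmem
          rcases List.mem_cons.mp hmem with h | h
          · cases h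
          · simp at h)
      (by have h1 := costT_le (buildT graph (graph.length + 1) 0 (-1))
          simp only [List.map_cons, List.map_nil, List.sum_cons, List.sum_nil, entCost]
          omega)
  rw [List.map_cons, List.map_nil, entPair, hroot] at hA
  rw [hA]
  -- B's recursion runs the same tree
  have hB := visitB_eq_visitT graph (buildT graph (graph.length + 1) 0 (-1)) (graph.length + 1)
      (-1) (List.replicate n.toNat none) 1 hmg
      (le_trans (heightT_le _) (by omega))
  rw [hroot] at hB
  rw [hB]
  simp [runM]
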